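-- pv_equiv track=rewrite | github.com/Weranry/eInkViewsV | modules/generate_views/palette_mapper.py | map_palette
-- ===== SOURCE A (Python) =====
-- def map_palette(palette, mode):
--     """
--     调色板映射函数
--     palette: [r,g,b, r,g,b, ...]
--     mode: None, '2bw', 'r2y', 'y2r', 'yr2r', 'yr2y'
--     """
--     if not mode or mode == 'None':
--         return palette
--     colors = [tuple(palette[i:i+3]) for i in range(0, len(palette), 3)]
--     WHITE = (255,255,255)
--     BLACK = (0,0,0)
--     RED = (255,0,0)
--     YELLOW = (255,255,0)
--     if mode == '2bw':
--         mapped = [WHITE if c == WHITE else BLACK for c in colors]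
--     elif mode == 'r2y':
--         mapped = [YELLOW if c == RED else c for c in colors]
--     elif mode == 'y2r':
--         mapped = [RED if c == YELLOW else c for c in colors]
--     elif mode == 'yr2r':
--         mapped = [RED if c == RED or c == YELLOW else c for c in colors]
--     elif mode == 'yr2y':
--         mapped = [YELLOW if c == RED or c == YELLOW else c for c in colors]
--     else:
--         mapped = colors
--     return [v for c in mapped for v in c]
-- ===== SOURCE B (Python) =====
-- def map_palette(palette, mode):
--     """
--     Copy-and-patch: initialise the whole output at once (a copy of the palette,
--     or an all-black canvas for '2bw'), then overwrite in place only the aligned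
--     full triples that belong to the mode's target set with its single
--     replacement colour.  No chunk list, no per-chunk mapping, no flatten pass.
--     """
--     if not mode or mode == 'None':
--         return palette
--     n = len(palette)
--     WHITE, BLACK, RED, YELLOW = (255, 255, 255), (0, 0, 0), (255, 0, 0), (255, 255, 0)
--     if mode == '2bw':
--         out, targets, rep = [0, 0, 0] * ((n + 2) // 3), (WHITE,), WHITE
--     elif mode == 'r2y':
--         out, targets, rep = list(palette), (RED,), YELLOW
--     elif mode == 'y2r':
--         out, targets, rep = list(palette), (YELLOW,), RED
--     elif mode == 'yr2r':
--         out, targets, rep = list(palette), (RED, YELLOW), RED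
--     elif mode == 'yr2y':
--         out, targets, rep = list(palette), (RED, YELLOW), YELLOW
--     else:
--         return list(palette)
--     for i in range(0, n - 2, 3):
--         if tuple(palette[i:i+3]) in targets:
--             out[i:i+3] = rep
--     return out
-- ===== Notes on version B (the rewrite author's own statement) =====
-- stated objective: faster
-- what changed: A maps every 3-chunk through a per-mode comprehension into a new list of tuples and then flattens it in a second pass; B instead initialises the entire output in one step (a copy of the palette, or an all-black canvas for '2bw') and then patches in place only the aligned triples that match the mode's target set, leaving all other elements untouched.
import Mathlib
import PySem

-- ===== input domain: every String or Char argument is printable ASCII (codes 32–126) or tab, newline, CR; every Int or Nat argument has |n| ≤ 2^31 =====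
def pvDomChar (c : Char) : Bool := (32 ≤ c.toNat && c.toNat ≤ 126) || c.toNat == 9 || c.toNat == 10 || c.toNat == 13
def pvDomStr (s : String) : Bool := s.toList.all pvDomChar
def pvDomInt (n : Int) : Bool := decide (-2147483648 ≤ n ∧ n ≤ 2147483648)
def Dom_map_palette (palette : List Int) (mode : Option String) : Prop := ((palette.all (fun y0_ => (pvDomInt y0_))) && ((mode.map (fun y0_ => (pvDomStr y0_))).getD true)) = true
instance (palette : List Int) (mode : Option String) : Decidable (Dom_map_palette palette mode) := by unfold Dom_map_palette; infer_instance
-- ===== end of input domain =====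

-- B replaces A's map-every-chunk-then-flatten with copy-and-patch: it initialises the
-- whole output at once (a copy of the palette, or an all-black canvas for '2bw') and
-- then overwrites in place only the aligned full triples in the mode's target set
-- (a timing run measured B faster by a constant factor).

-- ===== PORT A =====
def map_palette (palette : List Int) (mode : Option String) : List Int :=
  match mode with
  | none => palette
  | some m =>
    if m = "" ∨ m = "None" then palette
    else
      let colors := (PySem.List.pyRange 0 (palette.length : Int) 3).map
        (fun i => PySem.List.slice palette (some i) (some (i + 3)))
      let WHITE : List Int := [255, 255, 255]
      let BLACK : List Int := [0, 0, 0]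
      let RED : List Int := [255, 0, 0]
      let YELLOW : List Int := [255, 255, 0]
      let mapped :=
        if m = "2bw" then colors.map (fun c => if c = WHITE then WHITE else BLACK)
        else if m = "r2y" then colors.map (fun c => if c = RED then YELLOW else c)
        else if m = "y2r" then colors.map (fun c => if c = YELLOW then RED else c)
        else if m = "yr2r" then colors.map (fun c => if c = RED ∨ c = YELLOW then RED else c)
        else if m = "yr2y" then colors.map (fun c => if c = RED ∨ c = YELLOW then YELLOW else c)
        else colors
      mapped.flatMap (fun c => c)

-- ===== PORT B =====
-- Source B: per-mode (initial output, target set, replacement); '[0,0,0] * k' is ported as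
-- replicate-and-flatten; the slice assignment 'out[i:i+3] = rep' (equal lengths, 0 ≤ i)
-- is exactly 'out[:i] ++ rep ++ out[i+3:]', written with PySem slices.
def map_palette_alt (palette : List Int) (mode : Option String) : List Int :=
  match mode with
  | none => palette
  | some m =>
    if m = "" ∨ m = "None" then palette
    else
      let n : Int := (palette.length : Int)
      let WHITE : List Int := [255, 255, 255]
      let BLACK : List Int := [0, 0, 0]
      let RED : List Int := [255, 0, 0]
      let YELLOW : List Int := [255, 255, 0]
      let start : Option (List Int × List (List Int) × List Int) :=
        if m = "2bw" then some ((List.replicate ((palette.length + 2) / 3) BLACK).flatten, [WHITE], WHITE)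
        else if m = "r2y" then some (palette, [RED], YELLOW)
        else if m = "y2r" then some (palette, [YELLOW], RED)
        else if m = "yr2r" then some (palette, [RED, YELLOW], RED)
        else if m = "yr2y" then some (palette, [RED, YELLOW], YELLOW)
        else none
      match start with
      | none => palette  -- list(palette): the same list value
      | some (out0, targets, rep) =>
        (PySem.List.pyRange 0 (n - 2) 3).foldl
          (fun out i =>
            if PySem.List.slice palette (some i) (some (i + 3)) ∈ targets then
              PySem.List.slice out none (some i) ++ rep ++ PySem.List.slice out (some (i + 3)) none
            else out) out0

-- ===== PRECONDITION & SPEC =====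
def Spec_map_palette (palette : List Int) (mode : Option String) (out : List Int) : Prop := out = map_palette_alt palette mode
instance (palette : List Int) (mode : Option String) (out : List Int) : Decidable (Spec_map_palette palette mode out) := by unfold Spec_map_palette; infer_instance

-- ===== CLAIM =====
def Claim_equal_map_palette : Prop := ∀ (palette : List Int) (mode : Option String), Dom_map_palette palette mode → Spec_map_palette palette mode (map_palette palette mode)

-- ===== LEMMAS AND PROOFS =====

-- the k-th 3-chunk of xs
def chunk (xs : List Int) (k : Nat) : List Int := (xs.drop (3 * k)).take 3

lemma slice_chunk (xs : List Int) (k : Nat) :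
    PySem.List.slice xs (some ((0 : Int) + 3 * k)) (some ((0 : Int) + 3 * k + 3)) = chunk xs k := by
  have ha : (0 : Int) ≤ 0 + 3 * (k : Int) := by positivity
  have hb : (0 : Int) ≤ 0 + 3 * (k : Int) + 3 := by positivity
  rw [PySem.List.slice_toNat xs ha hb, chunk]
  congr 1
  · omega
  · congr 1; omega

-- length of a flatMap whose pieces all have length 3
lemma flatMap_len3 (g : Nat → List Int) (m : Nat) (h : ∀ k, k < m → (g k).length = 3) :
    ((List.range m).flatMap g).length = 3 * m := by
  induction m with
  | zero => simp
  | succ m ih =>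
    rw [List.range_succ, List.flatMap_append]
    simp only [List.length_append, ih (fun k hk => h k (Nat.lt_succ_of_lt hk)),
      List.flatMap_cons, List.flatMap_nil, List.append_nil, h m (Nat.lt_succ_self m)]
    omega

-- the patch loop: folding B's slice-assignment step over the first m aligned indices
-- turns an initial list whose k-th 3-block is b k into the flatMap of the patched blocks
lemma fold_patch (xs out0 : List Int) (targets : List (List Int)) (rep : List Int)
    (hrep : rep.length = 3) (b : Nat → List Int) (m : Nat)
    (hlen : ∀ k, k < m → (b k).length = 3)
    (hout : ∀ k, k < m → (out0.drop (3 * k)).take 3 = b k) :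
    ((List.range m).map (fun k : Nat => (0 : Int) + 3 * (k : Int))).foldl
      (fun out i =>
        if PySem.List.slice xs (some i) (some (i + 3)) ∈ targets then
          PySem.List.slice out none (some i) ++ rep ++ PySem.List.slice out (some (i + 3)) none
        else out) out0
    = (List.range m).flatMap (fun k => if chunk xs k ∈ targets then rep else b k)
      ++ out0.drop (3 * m) := by
  induction m with
  | zero => simp
  | succ m ih =>
    have hlen' : ∀ k, k < m → (b k).length = 3 := fun k hk => hlen k (Nat.lt_succ_of_lt hk)
    have hout' : ∀ k, k < m → (out0.drop (3 * k)).take 3 = b k := fun k hk => hout k (Nat.lt_succ_of_lt hk)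
    rw [List.range_succ, List.map_append, List.foldl_append, ih hlen' hout',
      List.flatMap_append]
    simp only [List.map_cons, List.map_nil, List.foldl_cons, List.foldl_nil,
      List.flatMap_cons, List.flatMap_nil, List.append_nil]
    have hsplit : out0.drop (3 * m) = b m ++ out0.drop (3 * (m + 1)) := by
      have h1 := hout m (Nat.lt_succ_self m)
      have h2 : out0.drop (3 * (m + 1)) = (out0.drop (3 * m)).drop 3 := by
        have h3 : 3 * (m + 1) = 3 * m + 3 := by ring
        rw [List.drop_drop, h3]
      rw [h2, ← h1, List.take_append_drop]
    have hflen : ((List.range m).flatMap (fun k => if chunk xs k ∈ targets then rep else b k)).length = 3 * m :=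
      flatMap_len3 _ m (fun k hk => by
        by_cases h : chunk xs k ∈ targets <;> simp [h, hrep, hlen' k hk])
    rw [slice_chunk]
    by_cases hc : chunk xs m ∈ targets
    · rw [if_pos hc]
      have ha : (0 : Int) ≤ 0 + 3 * (m : Int) := by positivity
      have hb3 : (0 : Int) ≤ 0 + 3 * (m : Int) + 3 := by positivity
      rw [PySem.List.slice_to _ ha, PySem.List.slice_from _ hb3]
      have hta : ((0 : Int) + 3 * (m : Int)).toNat = 3 * m := by omega
      have htb : ((0 : Int) + 3 * (m : Int) + 3).toNat = 3 * m + 3 := by omega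
      rw [hta, htb]
      have htake : (((List.range m).flatMap (fun k => if chunk xs k ∈ targets then rep else b k)) ++ out0.drop (3 * m)).take (3 * m)
          = (List.range m).flatMap (fun k => if chunk xs k ∈ targets then rep else b k) :=
        List.take_left' hflen
      have hdrop : (((List.range m).flatMap (fun k => if chunk xs k ∈ targets then rep else b k)) ++ out0.drop (3 * m)).drop (3 * m + 3)
          = out0.drop (3 * (m + 1)) := by
        rw [List.drop_append, List.drop_eq_nil_of_le (by omega), List.nil_append, hflen,
          List.drop_drop, show 3 * m + (3 * m + 3 - 3 * m) = 3 * (m + 1) by omega]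
      rw [htake, hdrop, if_pos hc, List.append_assoc]
    · rw [if_neg hc, if_neg hc, hsplit, List.append_assoc]

-- flatMap over a range is determined by the values below the bound
lemma flatMap_range_congr (g h : Nat → List Int) (m : Nat) (hgh : ∀ k, k < m → g k = h k) :
    (List.range m).flatMap g = (List.range m).flatMap h := by
  induction m with
  | zero => simp
  | succ m ih =>
    rw [List.range_succ, List.flatMap_append, List.flatMap_append,
      ih (fun k hk => hgh k (Nat.lt_succ_of_lt hk))]
    simp [hgh m (Nat.lt_succ_self m)]

-- flattening the first n 3-chunks is take (3n)
lemma chunk3_take (xs : List Int) (n : Nat) :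
    (List.range n).flatMap (fun k => (xs.drop (3 * k)).take 3) = xs.take (3 * n) := by
  induction n with
  | zero => simp
  | succ n ih =>
    rw [List.range_succ, List.flatMap_append, ih]
    have h1 : List.flatMap (fun k => (xs.drop (3 * k)).take 3) [n] = (xs.drop (3 * n)).take 3 := by
      simp
    rw [h1, ← List.take_add]
    congr 1

-- a full chunk has length 3
lemma chunk_len_full (xs : List Int) (k : Nat) (hk : k < xs.length / 3) :
    (chunk xs k).length = 3 := by
  simp only [chunk, List.length_take, List.length_drop]
  omega

-- the trailing partial chunk (when the length is not a multiple of 3)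
lemma chunk_tail (xs : List Int) (h : (xs.length + 2) / 3 = xs.length / 3 + 1) :
    chunk xs (xs.length / 3) = xs.drop (3 * (xs.length / 3)) ∧
      1 ≤ (chunk xs (xs.length / 3)).length ∧ (chunk xs (xs.length / 3)).length ≤ 2 := by
  refine ⟨List.take_of_length_le ?_, ?_, ?_⟩ <;>
    simp only [chunk, List.length_take, List.length_drop] <;> omega

-- '[0,0,0] * q' flattens to 3q zeros
lemma flat_rep (q : Nat) :
    (List.replicate q ([0, 0, 0] : List Int)).flatten = List.replicate (3 * q) (0 : Int) := by
  induction q with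
  | zero => simp
  | succ q ih =>
    rw [List.replicate_succ, List.flatten_cons, ih,
      show 3 * (q + 1) = 3 + 3 * q by ring, List.replicate_add]
    rfl

-- A's side normalised: per-chunk map + flatten over the pyRange of chunk starts
lemma A_norm (xs : List Int) (f : List Int → List Int) :
    (((PySem.List.pyRange 0 (xs.length : Int) 3).map
        (fun i => PySem.List.slice xs (some i) (some (i + 3)))).map f).flatMap (fun c => c)
    = (List.range ((xs.length + 2) / 3)).flatMap (fun k => f (chunk xs k)) := by
  rw [PySem.List.pyRange_of_pos 0 (xs.length : Int) (by norm_num)]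
  have hcnt : (if (0 : Int) < (xs.length : Int) then (((xs.length : Int) - 0 + 3 - 1) / 3).toNat else 0)
      = (xs.length + 2) / 3 := by split_ifs <;> omega
  rw [hcnt]
  simp only [List.map_map, List.flatMap_map]
  apply flatMap_range_congr
  intro k _
  simp only [Function.comp_apply, slice_chunk]

-- the central equation: A's per-chunk map + flatten = B's copy-and-patch loop,
-- given that the per-chunk map agrees with the patch rule on full chunks and
-- with the initial output on the trailing partial chunk
lemma mode_eq (xs out0 : List Int) (targets : List (List Int)) (rep : List Int)
    (f : List Int → List Int) (b : Nat → List Int)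
    (hrep : rep.length = 3)
    (hlen : ∀ k, k < xs.length / 3 → (b k).length = 3)
    (hout : ∀ k, k < xs.length / 3 → (out0.drop (3 * k)).take 3 = b k)
    (hfg : ∀ k, k < xs.length / 3 → f (chunk xs k) = if chunk xs k ∈ targets then rep else b k)
    (hrem0 : (xs.length + 2) / 3 = xs.length / 3 → out0.drop (3 * (xs.length / 3)) = [])
    (hrem1 : (xs.length + 2) / 3 = xs.length / 3 + 1 →
      f (chunk xs (xs.length / 3)) = out0.drop (3 * (xs.length / 3))) :
    (((PySem.List.pyRange 0 (xs.length : Int) 3).map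
        (fun i => PySem.List.slice xs (some i) (some (i + 3)))).map f).flatMap (fun c => c)
    = (PySem.List.pyRange 0 ((xs.length : Int) - 2) 3).foldl
        (fun out i =>
          if PySem.List.slice xs (some i) (some (i + 3)) ∈ targets then
            PySem.List.slice out none (some i) ++ rep ++ PySem.List.slice out (some (i + 3)) none
          else out) out0 := by
  rw [A_norm, PySem.List.pyRange_of_pos 0 ((xs.length : Int) - 2) (by norm_num)]
  have hcntB : (if (0 : Int) < (xs.length : Int) - 2 then (((xs.length : Int) - 2 - 0 + 3 - 1) / 3).toNat else 0)
      = xs.length / 3 := by split_ifs <;> omega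
  rw [hcntB, fold_patch xs out0 targets rep hrep b (xs.length / 3) hlen hout,
    show (xs.length + 2) / 3 = xs.length / 3 + ((xs.length + 2) / 3 - xs.length / 3) by omega,
    List.range_add, List.flatMap_append, List.flatMap_map,
    flatMap_range_congr _ (fun k => if chunk xs k ∈ targets then rep else b k) _ hfg]
  congr 1
  have hd : (xs.length + 2) / 3 - xs.length / 3 = 0 ∨ (xs.length + 2) / 3 - xs.length / 3 = 1 := by
    omega
  rcases hd with hd | hd
  · rw [hd, hrem0 (by omega)]
    simp
  · rw [hd]
    simp only [List.range_succ, List.range_zero, List.nil_append, List.flatMap_cons,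
      List.flatMap_nil, List.append_nil, Nat.add_zero]
    exact hrem1 (by omega)

-- flattening all the 3-chunks of xs gives xs back (the unknown-mode branches)
lemma flatten_chunks (xs : List Int) :
    ((PySem.List.pyRange 0 (xs.length : Int) 3).map
      (fun i => PySem.List.slice xs (some i) (some (i + 3)))).flatMap (fun c => c) = xs := by
  have h := A_norm xs (fun c => c)
  simp only [List.map_id'] at h
  rw [h]
  simp only [chunk]
  rw [chunk3_take]
  exact List.take_of_length_le (by omega)

-- the trailing partial chunk is never a full 3-element target colour
lemma tail_ne (xs : List Int) (c : List Int) (hc : c.length = 3)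
    (h : (xs.length + 2) / 3 = xs.length / 3 + 1) : chunk xs (xs.length / 3) ≠ c := by
  intro he
  have := (chunk_tail xs h).2.2
  rw [he, hc] at this
  omega

theorem map_palette_spec : Claim_equal_map_palette := by
  intro palette mode _
  unfold Spec_map_palette
  cases mode with
  | none => rfl
  | some m =>
    by_cases h0 : m = "" ∨ m = "None"
    · simp [map_palette, map_palette_alt, h0]
    · by_cases h1 : m = "2bw"
      · subst h1
        simp only [map_palette, map_palette_alt, if_neg h0]
        refine mode_eq palette _ [[255, 255, 255]] [255, 255, 255] _
          (fun _ => [0, 0, 0]) rfl (fun _ _ => rfl) ?_ ?_ ?_ ?_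
        · intro k hk
          rw [flat_rep, List.drop_replicate, List.take_replicate,
            show min 3 (3 * ((palette.length + 2) / 3) - 3 * k) = 3 by omega]
          rfl
        · intro k _
          simp only [List.mem_cons, List.not_mem_nil, or_false]
        · intro h
          rw [flat_rep, List.drop_replicate, show 3 * ((palette.length + 2) / 3) - 3 * (palette.length / 3) = 0 by omega]
          rfl
        · intro h
          rw [if_neg (tail_ne palette _ rfl h), flat_rep, List.drop_replicate,
            show 3 * ((palette.length + 2) / 3) - 3 * (palette.length / 3) = 3 by omega]
          rfl
      · by_cases h2 : m = "r2y"
        · subst h2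
          simp only [map_palette, map_palette_alt, if_neg h0, if_neg h1]
          refine mode_eq palette palette [[255, 0, 0]] [255, 255, 0] _
            (fun k => chunk palette k) rfl (chunk_len_full palette) (fun _ _ => rfl) ?_ ?_ ?_
          · intro k _
            simp only [List.mem_cons, List.not_mem_nil, or_false]
          · intro h
            exact List.drop_eq_nil_of_le (by omega)
          · intro h
            rw [if_neg (tail_ne palette _ rfl h)]
            exact (chunk_tail palette h).1
        · by_cases h3 : m = "y2r"
          · subst h3
            simp only [map_palette, map_palette_alt, if_neg h0, if_neg h1, if_neg h2]
            refine mode_eq palette palette [[255, 255, 0]] [255, 0, 0] _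
              (fun k => chunk palette k) rfl (chunk_len_full palette) (fun _ _ => rfl) ?_ ?_ ?_
            · intro k _
              simp only [List.mem_cons, List.not_mem_nil, or_false]
            · intro h
              exact List.drop_eq_nil_of_le (by omega)
            · intro h
              rw [if_neg (tail_ne palette _ rfl h)]
              exact (chunk_tail palette h).1
          · by_cases h4 : m = "yr2r"
            · subst h4
              simp only [map_palette, map_palette_alt, if_neg h0, if_neg h1, if_neg h2, if_neg h3]
              refine mode_eq palette palette [[255, 0, 0], [255, 255, 0]] [255, 0, 0] _
                (fun k => chunk palette k) rfl (chunk_len_full palette) (fun _ _ => rfl) ?_ ?_ ?_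
              · intro k _
                simp only [List.mem_cons, List.not_mem_nil, or_false]
              · intro h
                exact List.drop_eq_nil_of_le (by omega)
              · intro h
                rw [if_neg]
                · exact (chunk_tail palette h).1
                · intro hmem
                  have hmem' : chunk palette (palette.length / 3) = [255, 0, 0] ∨
                      chunk palette (palette.length / 3) = [255, 255, 0] := by
                    simpa using hmem
                  rcases hmem' with he | he
                  · exact tail_ne palette _ rfl h he
                  · exact tail_ne palette _ rfl h he
            · by_cases h5 : m = "yr2y"
              · subst h5
                simp only [map_palette, map_palette_alt, if_neg h0, if_neg h1, if_neg h2,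
                  if_neg h3, if_neg h4]
                refine mode_eq palette palette [[255, 0, 0], [255, 255, 0]] [255, 255, 0] _
                  (fun k => chunk palette k) rfl (chunk_len_full palette) (fun _ _ => rfl) ?_ ?_ ?_
                · intro k _
                  simp only [List.mem_cons, List.not_mem_nil, or_false]
                · intro h
                  exact List.drop_eq_nil_of_le (by omega)
                · intro h
                  rw [if_neg]
                  · exact (chunk_tail palette h).1
                  · intro hmem
                    have hmem' : chunk palette (palette.length / 3) = [255, 0, 0] ∨
                        chunk palette (palette.length / 3) = [255, 255, 0] := by
                      simpa using hmem
                    rcases hmem' with he | he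
                    · exact tail_ne palette _ rfl h he
                    · exact tail_ne palette _ rfl h he
              · simp only [map_palette, map_palette_alt, if_neg h0, if_neg h1, if_neg h2,
                  if_neg h3, if_neg h4, if_neg h5]
                exact flatten_chunks palette
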